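-- pv_equiv track=rewrite | github.com/tssrkt/Learning_Python | tasks/Checkio_2.py | weak_point
-- ===== SOURCE A (Python) =====
-- def weak_point(m):
--     rows = [sum(x) for x in m]
--     cols = []
--
--     for x in range(len(m[0])):
--         col = 0
--         for y in m:
--             col += y[x]
--         cols.append(col)
--
--     return [rows.index(min(rows)), cols.index(min(cols))]
-- ===== SOURCE B (Python) =====
-- def weak_point(m):
--     cols = [0] * len(m[0])
--     rows = []
--     for y in m:
--         rows.append(sum(y))
--         cols = [c + v for c, v in zip(cols, y)]
--     return [rows.index(min(rows)), cols.index(min(cols))]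
-- ===== Notes on version B (the rewrite author's own statement) =====
-- stated objective: alternative
-- what changed: Replaces A's two separate passes (a row-sum comprehension plus a column-indexed nested loop over range(len(m[0]))) by a single fused pass over the rows that accumulates row sums and a running column-sum vector via zip.
-- outside the precondition, e.g. on weak_point([[1, 2], [3]]): A raises IndexError, B returns [0, 0]
import Mathlib
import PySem

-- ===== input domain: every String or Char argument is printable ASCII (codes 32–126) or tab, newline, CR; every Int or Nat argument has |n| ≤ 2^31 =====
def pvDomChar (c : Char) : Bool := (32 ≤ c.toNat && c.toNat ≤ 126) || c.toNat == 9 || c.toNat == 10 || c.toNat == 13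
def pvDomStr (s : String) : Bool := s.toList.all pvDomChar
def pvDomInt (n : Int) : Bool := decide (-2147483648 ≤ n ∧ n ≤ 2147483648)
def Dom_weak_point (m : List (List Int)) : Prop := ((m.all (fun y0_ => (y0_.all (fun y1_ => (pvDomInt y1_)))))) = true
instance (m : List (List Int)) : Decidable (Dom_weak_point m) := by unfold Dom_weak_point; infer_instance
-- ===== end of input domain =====

-- B fuses A's two separate passes (row-sum comprehension + column-indexed nested loop)
-- into a single pass over the rows that maintains a running column-sum vector (objective: alternative).

-- ===== PORT A =====
-- rows = [sum(x) for x in m]; then for x in range(len(m[0])): col = 0; for y in m: col += y[x]; cols.append(col)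
def weak_point (m : List (List Int)) : List Int :=
  let rows : List Int := m.map (fun x => x.sum)
  let cols : List Int :=
    (PySem.List.pyRange 0 (((PySem.List.pyGet? m 0).getD []).length : Int) 1).foldl
      (fun cols x =>
        cols ++ [m.foldl (fun col y => col + (PySem.List.pyGet? y x).getD 0) 0]) []
  [((PySem.List.index? rows ((PySem.List.min? rows id).getD 0)).getD 0 : Nat),
   ((PySem.List.index? cols ((PySem.List.min? cols id).getD 0)).getD 0 : Nat)]

-- ===== PORT B =====
-- cols = [0]*len(m[0]); rows = []; one pass: rows.append(sum(y)); cols = [c+v for c,v in zip(cols,y)]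
def weak_point_alt (m : List (List Int)) : List Int :=
  let rc : List Int × List Int :=
    m.foldl (fun rc y => (rc.1 ++ [y.sum], List.zipWith (· + ·) rc.2 y))
      ([], List.replicate ((PySem.List.pyGet? m 0).getD []).length 0)
  let rows := rc.1
  let cols := rc.2
  [((PySem.List.index? rows ((PySem.List.min? rows id).getD 0)).getD 0 : Nat),
   ((PySem.List.index? cols ((PySem.List.min? cols id).getD 0)).getD 0 : Nat)]

-- ===== PRECONDITION & SPEC =====
-- Pre_ excludes exactly the inputs where A raises: empty m (IndexError on m[0]),
-- an empty first row (min(cols) on [] is a ValueError), and rows shorter than m[0] (IndexError on y[x]).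
def Pre_weak_point (m : List (List Int)) : Prop :=
  m ≠ [] ∧ 0 < (m.headD []).length ∧ ∀ y ∈ m, (m.headD []).length ≤ y.length
instance (m : List (List Int)) : Decidable (Pre_weak_point m) := by
  unfold Pre_weak_point; infer_instance
def pvWitness_weak_point : List (List Int) := [[7, 2, 7], [6, 8, 8], [1, 2, 3]]

def Spec_weak_point (m : List (List Int)) (out : List Int) : Prop := out = weak_point_alt m
instance (m : List (List Int)) (out : List Int) : Decidable (Spec_weak_point m out) := by unfold Spec_weak_point; infer_instance

-- ===== CLAIM (what is proved, stated in full; the proofs are below) =====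
def Claim_equal_weak_point : Prop := ∀ (m : List (List Int)), Dom_weak_point m → Pre_weak_point m → Spec_weak_point m (weak_point m)

-- ===== LEMMAS AND PROOFS =====

-- B's fused pair-fold splits into the row-sum list and a plain column fold.
theorem pairfold_split (m : List (List Int)) (r c : List Int) :
    m.foldl (fun rc y => (rc.1 ++ [y.sum], List.zipWith (· + ·) rc.2 y)) (r, c)
      = (r ++ m.map (fun x => x.sum), m.foldl (fun c y => List.zipWith (· + ·) c y) c) := by
  induction m generalizing r c with
  | nil => simp
  | cons y m ih => simp [ih]

-- Column fold preserves the accumulator's length when every row is long enough.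
theorem colfold_length (m : List (List Int)) (cs : List Int)
    (h : ∀ y ∈ m, cs.length ≤ y.length) :
    (m.foldl (fun c y => List.zipWith (· + ·) c y) cs).length = cs.length := by
  induction m generalizing cs with
  | nil => rfl
  | cons y m ih =>
    have hy : cs.length ≤ y.length := h y (by simp)
    have hlen : (List.zipWith (· + ·) cs y).length = cs.length := by
      simp [List.length_zipWith]; omega
    simp only [List.foldl_cons]
    rw [ih _ (by intro z hz; rw [hlen]; exact h z (by simp [hz]))]
    exact hlen

-- Entry i of the column fold is the accumulator's entry plus the column-i sums.
theorem colfold_get (m : List (List Int)) (cs : List Int)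
    (h : ∀ y ∈ m, cs.length ≤ y.length) (i : Nat) (hi : i < cs.length) :
    (m.foldl (fun c y => List.zipWith (· + ·) c y) cs)[i]'(by rw [colfold_length m cs h]; exact hi)
      = cs[i]'hi + (m.map (fun y => (PySem.List.pyGet? y (i : Int)).getD 0)).sum := by
  induction m generalizing cs with
  | nil => simp
  | cons y m ih =>
    have hy : cs.length ≤ y.length := h y (by simp)
    have hlen : (List.zipWith (· + ·) cs y).length = cs.length := by
      simp [List.length_zipWith]; omega
    simp only [List.foldl_cons, List.map_cons, List.sum_cons]
    rw [ih _ (by intro z hz; rw [hlen]; exact h z (by simp [hz])) (by omega)]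
    have hgi : (PySem.List.pyGet? y (i : Int)).getD 0 = y[i]'(by omega) := by
      rw [PySem.List.pyGet?_natCast]
      simp [List.getElem?_eq_getElem (by omega : i < y.length)]
    rw [List.getElem_zipWith, hgi]
    ring

-- The two column-sum lists coincide under Pre_.
theorem cols_eq (m : List (List Int)) (hp : Pre_weak_point m) :
    (PySem.List.pyRange 0 (((PySem.List.pyGet? m 0).getD []).length : Int) 1).foldl
        (fun cols x =>
          cols ++ [m.foldl (fun col y => col + (PySem.List.pyGet? y x).getD 0) 0]) []
      = m.foldl (fun c y => List.zipWith (· + ·) c y)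
          (List.replicate ((PySem.List.pyGet? m 0).getD []).length 0) := by
  obtain ⟨hne, -, hlen⟩ := hp
  have h0 : (PySem.List.pyGet? m 0).getD [] = m.headD [] := by
    cases m with
    | nil => rfl
    | cons y m => simp
  set n := (m.headD []).length with hn
  rw [h0, ← hn]
  have hlong : ∀ y ∈ m, (List.replicate n (0 : Int)).length ≤ y.length := by
    intro y hy; simpa using hlen y hy
  rw [PySem.List.foldl_append_singleton_eq_map, List.nil_append,
      PySem.List.pyRange_zero_natCast]
  apply List.ext_getElem
  · rw [colfold_length _ _ hlong]; simp
  · intro i h1 h2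
    have hi : i < n := by simpa using h1
    rw [colfold_get _ _ hlong i (by simpa using hi)]
    simp only [List.getElem_map, List.getElem_range, List.getElem_replicate, zero_add]
    rw [PySem.List.foldl_add]
    simp


-- ===== VERDICT (by name: the statement is the Claim_ definition above) =====
theorem weak_point_spec : Claim_equal_weak_point := by
  intro m _ hp
  unfold Spec_weak_point weak_point weak_point_alt
  rw [pairfold_split, cols_eq m hp]
  simp
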